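-- pv_equiv track=rewrite | github.com/Shashwat-Akhilesh-Shukla/Cognitive-AI | backend/voice/text_preprocessor.py | truncate_for_voice
-- ===== SOURCE A (Python) =====
-- from typing import List
--
-- def truncate_for_voice(sentences: List[str], max_words: int = 50) -> str:
--     """
--     Truncate text to appropriate length for voice output.
--
--     Args:
--         sentences: List of sentences
--         max_words: Maximum word count
--
--     Returns:
--         Truncated text suitable for TTS
--     """
--     if not sentences:
--         return ""
--
--     result = []
--     word_count = 0
--
--     for sentence in sentences:
--         sentence_words = len(sentence.split())
--
--         if word_count + sentence_words <= max_words: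
--             result.append(sentence)
--             word_count += sentence_words
--         else:
--             # If first sentence is too long, include it anyway but truncate
--             if not result:
--                 words = sentence.split()[:max_words]
--                 truncated = ' '.join(words)
--                 if not truncated.endswith(('.', '!', '?')):
--                     truncated += '.'
--                 result.append(truncated)
--             break
--
--     return ' '.join(result)
-- ===== SOURCE B (Python) =====
-- from typing import List
--
-- def truncate_for_voice(sentences: List[str], max_words: int = 50) -> str:
--     if not sentences:
--         return ""
--     counts = [len(s.split()) for s in sentences]
--     cums = []
--     total = 0
--     for c in counts:
--         total += c
--         cums.append(total)
--     # cums is nondecreasing, so the fitting prefix length is the count of cums <= max_words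
--     n = sum(1 for c in cums if c <= max_words)
--     if n > 0:
--         return ' '.join(sentences[:n])
--     words = sentences[0].split()[:max_words]
--     truncated = ' '.join(words)
--     if not truncated.endswith(('.', '!', '?')):
--         truncated += '.'
--     return truncated
-- ===== Notes on version B (the rewrite author's own statement) =====
-- stated objective: alternative
-- what changed: Replaces A's single greedy loop with early break and incremental result list by a precompute-then-select decomposition: per-sentence word counts, cumulative totals, the fitting prefix length obtained as a count of cumulative totals <= max_words (valid since the totals are nondecreasing), and a slice-join; the first-sentence truncation fallback is kept.
import Mathlib
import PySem

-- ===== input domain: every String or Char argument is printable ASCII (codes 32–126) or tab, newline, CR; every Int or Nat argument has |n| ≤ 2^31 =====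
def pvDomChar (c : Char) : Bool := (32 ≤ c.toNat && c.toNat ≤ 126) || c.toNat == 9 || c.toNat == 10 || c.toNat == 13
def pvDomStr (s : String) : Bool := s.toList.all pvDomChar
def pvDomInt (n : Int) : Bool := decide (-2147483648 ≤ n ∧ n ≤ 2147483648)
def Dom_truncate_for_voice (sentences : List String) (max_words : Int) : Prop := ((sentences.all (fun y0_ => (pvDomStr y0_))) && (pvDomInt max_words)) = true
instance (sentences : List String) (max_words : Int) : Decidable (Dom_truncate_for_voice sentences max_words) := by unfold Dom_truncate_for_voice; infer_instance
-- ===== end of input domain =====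

-- B replaces A's greedy break-loop by counts → cumulative totals → count-of-fitting prefix → slice-join (alternative decomposition, same cost).


-- ===== PORT A =====
-- shared transliteration of the identical truncate-first-sentence lines of both Pythons
def pvTruncFirst (s : String) (mw : Int) : String :=
  let words := PySem.List.slice (PySem.Str.split₀ s) none (some mw)
  let truncated := PySem.Str.join " " words
  if PySem.Str.endswith truncated "." || PySem.Str.endswith truncated "!" ||
     PySem.Str.endswith truncated "?" then truncated
  else truncated ++ "."

-- the for-loop of A: result list, running word_count, break on first non-fitting sentence
def truncLoopA (mw : Int) : List String → List String → Int → List String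
  | [], result, _ => result
  | s :: rest, result, wc =>
    let sw : Int := ((PySem.Str.split₀ s).length : Int)
    if wc + sw ≤ mw then truncLoopA mw rest (result ++ [s]) (wc + sw)
    else if result = [] then result ++ [pvTruncFirst s mw]
    else result

def truncate_for_voice (sentences : List String) (max_words : Int) : String :=
  match sentences with
  | [] => ""
  | _ :: _ => PySem.Str.join " " (truncLoopA max_words sentences [] 0)

-- ===== PORT B =====
def truncate_for_voice_alt (sentences : List String) (max_words : Int) : String :=
  match sentences with
  | [] => ""
  | s0 :: _ =>
    let counts : List Int := sentences.map (fun s => ((PySem.Str.split₀ s).length : Int))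
    let cums := (counts.foldl (fun acc c => (acc.1 ++ [acc.2 + c], acc.2 + c))
                  (([] : List Int), (0 : Int))).1
    let n : Nat := cums.countP (fun c => decide (c ≤ max_words))
    if 0 < n then PySem.Str.join " " (List.take n sentences)
    else pvTruncFirst s0 max_words

-- ===== PRECONDITION & SPEC =====
def Spec_truncate_for_voice (sentences : List String) (max_words : Int) (out : String) : Prop := out = truncate_for_voice_alt sentences max_words
instance (sentences : List String) (max_words : Int) (out : String) : Decidable (Spec_truncate_for_voice sentences max_words out) := by unfold Spec_truncate_for_voice; infer_instance

-- ===== CLAIM (what is proved, stated in full; the proofs are below) =====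
def Claim_equal_truncate_for_voice : Prop := ∀ (sentences : List String) (max_words : Int), Dom_truncate_for_voice sentences max_words → Spec_truncate_for_voice sentences max_words (truncate_for_voice sentences max_words)

-- ===== LEMMAS AND PROOFS =====

-- proof-side: cumulative sums starting from a
def cumList (a : Int) : List Int → List Int
  | [] => []
  | c :: cs => (a + c) :: cumList (a + c) cs

-- proof-side: length of the fitting prefix given already-used word budget a
def fitLen (mw : Int) (a : Int) : List Int → Nat
  | [] => 0
  | c :: cs => if a + c ≤ mw then fitLen mw (a + c) cs + 1 else 0

theorem foldl_cums (counts : List Int) (acc : List Int) (a : Int) :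
    (counts.foldl (fun acc c => (acc.1 ++ [acc.2 + c], acc.2 + c)) (acc, a)).1
      = acc ++ cumList a counts := by
  induction counts generalizing acc a with
  | nil => simp [cumList]
  | cons c cs ih => simp [List.foldl, cumList, ih]

theorem cumList_lb (cs : List Int) (a : Int) (h : ∀ c ∈ cs, 0 ≤ c) :
    ∀ x ∈ cumList a cs, a ≤ x := by
  induction cs generalizing a with
  | nil => simp [cumList]
  | cons c cs ih =>
    intro x hx
    simp only [cumList, List.mem_cons] at hx
    rcases hx with rfl | hx
    · have := h c (by simp); omega
    · have := ih (a + c) (fun d hd => h d (by simp [hd])) x hx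
      have := h c (by simp); omega

theorem countP_cumList (mw : Int) (cs : List Int) (a : Int) (h : ∀ c ∈ cs, 0 ≤ c) :
    (cumList a cs).countP (fun c => decide (c ≤ mw)) = fitLen mw a cs := by
  induction cs generalizing a with
  | nil => simp [cumList, fitLen]
  | cons c cs ih =>
    simp only [cumList, fitLen, List.countP_cons]
    by_cases hc : a + c ≤ mw
    · simp [hc, ih (a + c) (fun d hd => h d (by simp [hd]))]
    · have hz : (cumList (a + c) cs).countP (fun c => decide (c ≤ mw)) = 0 := by
        rw [List.countP_eq_zero]
        intro x hx
        have := cumList_lb cs (a + c) (fun d hd => h d (by simp [hd])) x hx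
        simp; omega
      simp [hc, hz]

theorem truncLoopA_ne_nil (mw : Int) (rest acc : List String) (wc : Int) (hacc : acc ≠ []) :
    truncLoopA mw rest acc wc
      = acc ++ List.take (fitLen mw wc (rest.map (fun s => ((PySem.Str.split₀ s).length : Int)))) rest := by
  induction rest generalizing acc wc with
  | nil => simp [truncLoopA]
  | cons s rest ih =>
    simp only [truncLoopA, List.map_cons, fitLen]
    by_cases hc : wc + ((PySem.Str.split₀ s).length : Int) ≤ mw
    · simp only [hc, if_pos]
      rw [ih (acc ++ [s]) _ (by simp)]
      simp
    · simp [hc, hacc]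

theorem counts_nonneg (l : List String) :
    ∀ c ∈ l.map (fun s => ((PySem.Str.split₀ s).length : Int)), 0 ≤ c := by
  intro c hc
  simp only [List.mem_map] at hc
  obtain ⟨s, _, rfl⟩ := hc
  exact Int.natCast_nonneg _

theorem join_singleton_str (t : String) : PySem.Str.join " " [t] = t := by
  simp [PySem.Str.join, PySem.Chars.join, List.intercalate]

-- ===== VERDICT (by name: the statement is the Claim_ definition above) =====
theorem truncate_for_voice_spec : Claim_equal_truncate_for_voice := by
  intro sentences max_words _
  unfold Spec_truncate_for_voice truncate_for_voice truncate_for_voice_alt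
  match sentences with
  | [] => rfl
  | s0 :: rest =>
    simp only []
    rw [foldl_cums, List.nil_append,
        countP_cumList max_words _ 0 (counts_nonneg (s0 :: rest))]
    simp only [List.map_cons, fitLen]
    set c0 : Int := ((PySem.Str.split₀ s0).length : Int) with hc0
    by_cases h : (0 : Int) + c0 ≤ max_words
    · -- first sentence fits: A adds it, result nonempty thereafter
      simp only [h, if_pos]
      have hA : truncLoopA max_words (s0 :: rest) [] 0
          = [s0] ++ List.take (fitLen max_words (0 + c0) (rest.map (fun s => ((PySem.Str.split₀ s).length : Int)))) rest := by
        simp only [truncLoopA, ← hc0, h, if_pos, List.nil_append]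
        exact truncLoopA_ne_nil max_words rest [s0] (0 + c0) (by simp)
      rw [hA]
      simp [List.take_succ_cons]
    · simp only [h, if_neg, not_false_iff]
      simp only [truncLoopA, ← hc0, h, if_neg, not_false_iff]
      simp [join_singleton_str]
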